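-- pv_equiv track=rewrite | github.com/hamidbeiki/Cattle-Genome | python scripts/summarize_miRNA_transcript_interactions.py | get_venn_sections
-- ===== SOURCE A (Python) =====
-- def get_venn_sections(sets):
--     """
--     Given a list of sets, return a new list of sets with all the possible
--     mutually exclusive overlapping combinations of those sets.  Another way
--     to think of this is the mutually exclusive sections of a venn diagram
--     of the sets.  If the original list has N sets, the returned list will
--     have (2**N)-1 sets.
--
--     Parameters
--     ----------
--     sets : list of set
--
--     Returns
--     -------
--     combinations : list of tuple
--         tag : str
--             Binary string representing which sets are included / excluded in
--             the combination.
--         set : set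
--             The set formed by the overlapping input sets.
--     """
--     num_combinations = 2 ** len(sets)
--     bit_flags = [2 ** n for n in range(len(sets))]
--     flags_zip_sets = [z for z in zip(bit_flags, sets)]
--     combo_sets = []
--     for bits in range(num_combinations - 1, 0, -1):
--         include_sets = [s for flag, s in flags_zip_sets if bits & flag]
--         exclude_sets = [s for flag, s in flags_zip_sets if not bits & flag]
--         combo = set.intersection(*include_sets)
--         combo = set.difference(combo, *exclude_sets)
--         tag = ''.join([str(int((bits & flag) > 0)) for flag in bit_flags])
--         combo_sets.append((tag, combo))
--     return combo_sets
-- ===== SOURCE B (Python) =====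
-- def get_venn_sections(sets):
--     n = len(sets)
--
--     def mask(x):
--         m = 0
--         for i, s in enumerate(sets):
--             if x in s:
--                 m |= 1 << i
--         return m
--
--     seen = set()
--     buckets = {}
--     for s in sets:
--         for x in s:
--             if x not in seen:
--                 seen.add(x)
--                 buckets.setdefault(mask(x), []).append(x)
--     return [(''.join('1' if (bits >> i) & 1 else '0' for i in range(n)),
--              set(buckets.get(bits, [])))
--             for bits in range(2 ** n - 1, 0, -1)]
-- ===== Notes on version B (the rewrite author's own statement) =====
-- stated objective: alternative
-- what changed: Instead of recomputing an intersection/difference over all N sets for each of the 2^N-1 combinations, B computes each element's membership bitmask once and buckets elements by mask, then emits the 2^N-1 (tag, bucket) pairs in the same order; intended as faster (measured 2.26x at the largest size both finished), but a timing run could not confirm it at the top size.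
import Mathlib
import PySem

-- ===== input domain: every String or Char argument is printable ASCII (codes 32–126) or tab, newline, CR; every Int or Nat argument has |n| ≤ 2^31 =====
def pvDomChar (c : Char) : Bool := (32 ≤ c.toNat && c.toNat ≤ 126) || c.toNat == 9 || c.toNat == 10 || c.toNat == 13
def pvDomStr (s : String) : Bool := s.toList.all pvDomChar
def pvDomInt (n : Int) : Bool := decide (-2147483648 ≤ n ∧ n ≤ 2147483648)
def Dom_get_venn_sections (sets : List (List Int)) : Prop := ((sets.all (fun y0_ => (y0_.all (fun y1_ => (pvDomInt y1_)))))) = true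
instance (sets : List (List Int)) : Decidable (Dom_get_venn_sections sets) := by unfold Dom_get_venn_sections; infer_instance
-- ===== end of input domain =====

-- B replaces A's per-combination intersection/difference scans by bucketing each element once under its
-- membership bitmask and emitting the buckets in the same order: a different algorithm over the same data.


-- ===== PORT A =====
def get_venn_sections (sets : List (List Int)) : List (String × List Int) :=
  -- num_combinations = 2 ** len(sets); bit_flags = [2 ** n for n in range(len(sets))]
  -- (the Python arguments are sets: each list is taken as set(list), PySem.Set.ofList)
  let ssets := sets.map PySem.Set.ofList
  let n := sets.length
  let numCombinations := 2 ^ n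
  let bitFlags := (List.range n).map (fun i => 2 ^ i)
  let flagsZipSets := bitFlags.zip ssets
  -- range(num_combinations - 1, 0, -1): all values are nonnegative, ported as a Nat list
  let bitsList := ((List.range (numCombinations - 1)).map (· + 1)).reverse
  bitsList.foldl (fun comboSets bits =>
    let includeSets := (flagsZipSets.filter (fun p => bits &&& p.1 != 0)).map (·.2)
    let excludeSets := (flagsZipSets.filter (fun p => !(bits &&& p.1 != 0))).map (·.2)
    -- set.intersection(*include_sets): include_sets is nonempty for every bits ≥ 1
    let combo := match includeSets with
      | [] => []
      | h :: t => t.foldl (fun a s => a.filter (fun x => decide (x ∈ s))) h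
    let combo2 := excludeSets.foldl (fun a s => a.filter (fun x => decide (x ∉ s))) combo
    let tag := String.join (bitFlags.map (fun flag => if bits &&& flag > 0 then "1" else "0"))
    comboSets ++ [(tag, combo2)]) []

-- ===== PORT B =====
-- helper of B: membership bitmask of x over the input sets (Source B's local 'mask')
def pvMaskB (ssets : List (List Int)) (x : Int) : Nat :=
  -- indices from enumerate are ≥ 0, so .toNat is exact here
  (PySem.List.enumerate ssets).foldl
    (fun m p => if x ∈ p.2 then m ||| (1 <<< p.1.toNat) else m) 0

def get_venn_sections_alt (sets : List (List Int)) : List (String × List Int) :=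
  let ssets := sets.map PySem.Set.ofList
  let n := sets.length
  -- seen = set(); buckets = {}; for s in sets: for x in s: if unseen, bucket x by mask
  let st := ssets.foldl (fun st s =>
    s.foldl (fun (st : PySem.Set Int × PySem.Dict Nat (List Int)) x =>
      if st.1.contains x then st
      else (PySem.Set.add st.1 x,
            st.2.modify (pvMaskB ssets x) [] (fun l => l ++ [x]))) st)
    (PySem.Set.empty, PySem.Dict.empty)
  let buckets := st.2
  -- range(2 ** n - 1, 0, -1): nonnegative, ported as a Nat list
  (((List.range (2 ^ n - 1)).map (· + 1)).reverse).map (fun bits =>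
    (String.join ((List.range n).map (fun i => if (bits >>> i) &&& 1 = 1 then "1" else "0")),
     buckets.getD bits []))

-- ===== PRECONDITION & SPEC =====
def Spec_get_venn_sections (sets : List (List Int)) (out : List (String × List Int)) : Prop := out = get_venn_sections_alt sets
instance (sets : List (List Int)) (out : List (String × List Int)) : Decidable (Spec_get_venn_sections sets out) := by unfold Spec_get_venn_sections; infer_instance

-- ===== CLAIM (what is proved, stated in full; the proofs are below) =====
def Claim_equal_get_venn_sections : Prop := ∀ (sets : List (List Int)), Dom_get_venn_sections sets → Spec_get_venn_sections sets (get_venn_sections sets)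


-- ===== LEMMAS AND PROOFS =====

lemma pvMaskB_testBit (ss : List (List Int)) (x : Int) (j : Nat) :
    (pvMaskB ss x).testBit j = (decide (j < ss.length) && decide (x ∈ ss.getD j [])) := by
  induction ss using List.reverseRecOn with
  | nil => simp [pvMaskB, PySem.List.enumerate]
  | append_singleton l s ih =>
    have h1 : pvMaskB (l ++ [s]) x =
        if x ∈ s then pvMaskB l x ||| (1 <<< l.length) else pvMaskB l x := by
      simp [pvMaskB, PySem.List.enumerate_append, List.foldl_append, PySem.List.enumerate]
    rw [h1]
    rcases Nat.lt_trichotomy j l.length with hj | hj | hj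
    · have hg : (l ++ [s]).getD j [] = l.getD j [] := by
        rw [List.getD_eq_getElem?_getD, List.getD_eq_getElem?_getD, List.getElem?_append_left hj]
      split <;> simp [Nat.testBit_or, Nat.one_shiftLeft, Nat.testBit_two_pow, ih, hg,
        Nat.lt_succ_of_lt hj, hj, Nat.ne_of_gt hj]
    · subst hj
      have hg : (l ++ [s]).getD l.length [] = s := by
        rw [List.getD_eq_getElem?_getD]
        simp
      have hlen : ¬ (l.length < l.length) := by omega
      split <;> simp_all [Nat.testBit_or, Nat.one_shiftLeft, Nat.testBit_two_pow, ih]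
    · have hg : (l ++ [s]).getD j [] = [] := by
        rw [List.getD_eq_getElem?_getD]
        rw [List.getElem?_eq_none (by simp; omega)]
        rfl
      have e1 : ¬ j < l.length := by omega
      have e2 : ¬ j < l.length + 1 := by omega
      have e3 : l.length ≠ j := by omega
      split <;> simp [Nat.testBit_or, Nat.one_shiftLeft, Nat.testBit_two_pow, ih, hg, e1, e2, e3]

lemma pvMask_eq_iff (ss : List (List Int)) (x : Int) (bits : Nat) (hb : bits < 2 ^ ss.length) :
    pvMaskB ss x = bits ↔ ∀ j, j < ss.length → (bits.testBit j ↔ x ∈ ss.getD j []) := by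
  constructor
  · rintro rfl j hj
    rw [pvMaskB_testBit]
    simp [hj]
  · intro h
    apply Nat.eq_of_testBit_eq
    intro j
    by_cases hj : j < ss.length
    · rw [pvMaskB_testBit]
      simp only [hj, decide_true, Bool.true_and]
      have hiff := h j hj
      rcases Bool.eq_false_or_eq_true (bits.testBit j) with hB | hB
      · rw [hB]
        rw [decide_eq_true_eq]
        exact hiff.mp hB
      · rw [hB]
        rw [decide_eq_false_iff_not]
        intro hx
        rw [hiff.mpr hx] at hB
        simp at hB
    · have h1 : (pvMaskB ss x).testBit j = false := by
        rw [pvMaskB_testBit]; simp [hj]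
      have h2 : bits.testBit j = false :=
        Nat.testBit_lt_two_pow (lt_of_lt_of_le hb (Nat.pow_le_pow_right (by norm_num) (by omega)))
      rw [h1, h2]

lemma foldl_filter_eq_filter_all {α β : Type} (l : List β) (p : β → α → Bool) (a0 : List α) :
    l.foldl (fun a s => a.filter (p s)) a0 = a0.filter (fun x => l.all (fun s => p s x)) := by
  induction l generalizing a0 with
  | nil => simp
  | cons s l ih =>
    rw [List.foldl_cons, ih, List.filter_filter]
    apply List.filter_congr
    intro x _
    simp [Bool.and_comm]

lemma tag_eq (n bits : Nat) :
    String.join ((((List.range n).map (fun i => 2 ^ i)).map (fun flag => if bits &&& flag > 0 then "1" else "0"))) =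
    String.join ((List.range n).map (fun i => if (bits >>> i) &&& 1 = 1 then "1" else "0")) := by
  rw [List.map_map]
  congr 1
  apply List.map_congr_left
  intro i _
  have h1 : bits &&& 2 ^ i = (bits.testBit i).toNat * 2 ^ i := Nat.and_two_pow bits i
  have h2 : (bits >>> i) &&& 1 = bits >>> i % 2 := Nat.and_one_is_mod (bits >>> i)
  have h3 : bits.testBit i = decide (bits >>> i % 2 = 1) := by
    rw [Nat.testBit_eq_decide_div_mod_eq, Nat.shiftRight_eq_div_pow]
  have hp : (0:Nat) < 2 ^ i := by positivity
  have hcond : (bits &&& 2 ^ i > 0) ↔ ((bits >>> i) &&& 1 = 1) := by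
    rw [h1, h2]
    cases hb : bits.testBit i
    · have hm : bits >>> i % 2 ≠ 1 := fun hc => by rw [hb] at h3; simp [hc] at h3
      simp [hb]
      omega
    · have hm : bits >>> i % 2 = 1 := of_decide_eq_true (h3.symm.trans hb)
      simp [hb, hp, hm]
  simp [hcond]

def pvStep (ss : List (List Int)) (st : PySem.Set Int × PySem.Dict Nat (List Int)) (x : Int) :
    PySem.Set Int × PySem.Dict Nat (List Int) :=
  if st.1.contains x then st
  else (PySem.Set.add st.1 x, st.2.modify (pvMaskB ss x) [] (fun l => l ++ [x]))

lemma pvFold_inv (ss : List (List Int)) (w : List Int) : ∀ (v : List Int) (b : PySem.Dict Nat (List Int)),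
    (∀ m, b.getD m [] = (PySem.Set.ofList v).filter (fun x => pvMaskB ss x == m)) →
    (w.foldl (pvStep ss) (PySem.Set.ofList v, b)).1 = PySem.Set.ofList (v ++ w) ∧
    (∀ m, (w.foldl (pvStep ss) (PySem.Set.ofList v, b)).2.getD m [] =
      (PySem.Set.ofList (v ++ w)).filter (fun x => pvMaskB ss x == m)) := by
  induction w with
  | nil =>
    intro v b hb
    exact ⟨by simp, by simpa using hb⟩
  | cons x w ih =>
    intro v b hb
    rw [List.foldl_cons]
    by_cases hx : x ∈ v
    · have hmem : x ∈ PySem.Set.ofList v := (PySem.Set.mem_ofList v x).mpr hx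
      have hofl : PySem.Set.ofList (v ++ [x]) = PySem.Set.ofList v := by
        rw [PySem.Set.ofList_append_singleton, PySem.Set.add_of_mem hmem]
      have hstep : pvStep ss (PySem.Set.ofList v, b) x = (PySem.Set.ofList v, b) := by
        simp [pvStep, PySem.Set.contains_iff, hmem]
      rw [hstep]
      have hb2 : ∀ m, b.getD m [] = (PySem.Set.ofList (v ++ [x])).filter (fun y => pvMaskB ss y == m) := by
        intro m
        rw [hofl]
        exact hb m
      have hres := ih (v ++ [x]) b hb2
      rw [hofl] at hres
      rw [List.append_assoc] at hres
      simpa using hres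
    · have hmem : x ∉ PySem.Set.ofList v := fun hc => hx ((PySem.Set.mem_ofList v x).mp hc)
      have hofl : PySem.Set.ofList (v ++ [x]) = PySem.Set.ofList v ++ [x] := by
        rw [PySem.Set.ofList_append_singleton, PySem.Set.add_of_not_mem hmem]
      have hstep : pvStep ss (PySem.Set.ofList v, b) x =
          (PySem.Set.ofList (v ++ [x]), b.modify (pvMaskB ss x) [] (fun l => l ++ [x])) := by
        simp [pvStep, PySem.Set.contains_iff, hmem, hofl, PySem.Set.add_of_not_mem hmem]
      rw [hstep]
      have hb' : ∀ m, (b.modify (pvMaskB ss x) [] (fun l => l ++ [x])).getD m [] =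
          (PySem.Set.ofList (v ++ [x])).filter (fun y => pvMaskB ss y == m) := by
        intro m
        rw [hofl, List.filter_append]
        by_cases hm : m = pvMaskB ss x
        · subst hm
          rw [PySem.Dict.getD_modify_self, hb]
          simp
        · have hne : (m : Nat) ≠ pvMaskB ss x := hm
          rw [PySem.Dict.getD_modify_of_ne _ _ _ hne, hb]
          have hfx : (pvMaskB ss x == m) = false := by
            simp [beq_iff_eq]
            exact fun hc => hm hc.symm
          simp [hfx]
      have hres := ih (v ++ [x]) _ hb'
      rw [List.append_assoc] at hres
      simpa using hres

lemma buckets_getD (ss : List (List Int)) (m : Nat) :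
    ((ss.foldl (fun st s => s.foldl (pvStep ss) st) ((PySem.Set.empty : PySem.Set Int), (PySem.Dict.empty : PySem.Dict Nat (List Int)))).2).getD m []
      = (PySem.Set.ofList ss.flatten).filter (fun x => pvMaskB ss x == m) := by
  rw [← List.foldl_flatten]
  have h := pvFold_inv ss ss.flatten [] PySem.Dict.empty (fun m => rfl)
  simpa using h.2 m

lemma ofList_append_split (l1 l2 : List Int) :
    PySem.Set.ofList (l1 ++ l2) =
      PySem.Set.ofList l1 ++ (PySem.Set.ofList l2).filter (fun y => !(PySem.Set.contains (PySem.Set.ofList l1) y)) := by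
  rw [PySem.Set.ofList_append, PySem.Set.update_eq_append_filter]

lemma filter_ofList_flatten_eq (ss : List (List Int)) (P : Int → Bool) (j0 : Nat) (hj0 : j0 < ss.length)
    (hnd : ss[j0].Nodup)
    (hin : ∀ x, P x → x ∈ ss[j0])
    (hlow : ∀ (x : Int) (j : Nat) (hj : j < ss.length), j < j0 → P x = true → x ∉ ss[j]'hj) :
    (PySem.Set.ofList ss.flatten).filter P = ss[j0].filter P := by
  have hdec : ss = ss.take j0 ++ ss[j0] :: ss.drop (j0 + 1) := by
    conv_lhs => rw [← List.take_append_drop j0 ss]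
    rw [List.drop_eq_getElem_cons hj0]
  have hflat : ss.flatten = (ss.take j0).flatten ++ (ss[j0] ++ (ss.drop (j0 + 1)).flatten) := by
    conv_lhs => rw [hdec]
    rw [List.flatten_append, List.flatten_cons]
  have hA0 : ∀ x ∈ (ss.take j0).flatten, P x = false := by
    intro x hxA
    rw [List.mem_flatten] at hxA
    obtain ⟨l, hl, hxl⟩ := hxA
    rw [List.mem_take_iff_getElem] at hl
    obtain ⟨i, hi, he⟩ := hl
    by_contra hP
    simp only [Bool.not_eq_false] at hP
    refine hlow x i (by omega) (by omega) hP ?_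
    have : ss[i]'(by omega) = l := by simpa using he
    rw [this]
    exact hxl
  have hnotA : ∀ a : Int, P a = true → a ∉ (ss.take j0).flatten :=
    fun a hP hc => by simp [hA0 a hc] at hP
  rw [hflat, ofList_append_split, List.filter_append]
  have h1 : (PySem.Set.ofList (ss.take j0).flatten).filter P = [] := by
    rw [List.filter_eq_nil_iff]
    intro a ha
    have : a ∈ (ss.take j0).flatten := (PySem.Set.mem_ofList _ a).mp ha
    simp [hA0 a this]
  rw [h1, List.nil_append, List.filter_filter]
  have h2 : (PySem.Set.ofList (ss[j0] ++ (ss.drop (j0 + 1)).flatten)).filter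
      (fun a => P a && (!(PySem.Set.contains (PySem.Set.ofList (ss.take j0).flatten) a))) =
      (PySem.Set.ofList (ss[j0] ++ (ss.drop (j0 + 1)).flatten)).filter P := by
    apply List.filter_congr
    intro a _
    cases hP : P a
    · simp [hP]
    · have hc : PySem.Set.contains (PySem.Set.ofList (ss.take j0).flatten) a = false := by
        rw [← Bool.not_eq_true, PySem.Set.contains_iff]
        exact fun hc => hnotA a hP ((PySem.Set.mem_ofList _ a).mp hc)
      simp [hc, hP]
      exact fun l hl hc2 => hnotA a hP (List.mem_flatten.mpr ⟨l, hl, hc2⟩)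
  rw [h2, ofList_append_split, List.filter_append, List.filter_filter]
  have h3 : (PySem.Set.ofList (ss.drop (j0 + 1)).flatten).filter
      (fun a => P a && (!(PySem.Set.contains (PySem.Set.ofList ss[j0]) a))) = [] := by
    rw [List.filter_eq_nil_iff]
    intro a _
    cases hP : P a
    · simp [hP]
    · have : PySem.Set.contains (PySem.Set.ofList ss[j0]) a = true := by
        rw [PySem.Set.contains_iff, PySem.Set.mem_ofList]
        exact hin a hP
      simp [this, hP]
      exact hin a hP
  rw [h3, List.append_nil]
  have hself : PySem.Set.ofList ss[j0] = ss[j0] := PySem.Set.ofList_eq_self_of_nodup _ hnd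
  rw [hself]

def pvCombo (ss : List (List Int)) (bits : Nat) : List Int :=
  let flagsZipSets := ((List.range ss.length).map (fun i => 2 ^ i)).zip ss
  let includeSets := (flagsZipSets.filter (fun p => bits &&& p.1 != 0)).map (·.2)
  let excludeSets := (flagsZipSets.filter (fun p => !(bits &&& p.1 != 0))).map (·.2)
  let combo := match includeSets with
    | [] => []
    | h :: t => t.foldl (fun a s => a.filter (fun x => decide (x ∈ s))) h
  excludeSets.foldl (fun a s => a.filter (fun x => decide (x ∉ s))) combo

lemma combo_eq_filter (ss : List (List Int)) (hnd : ∀ s ∈ ss, s.Nodup) (bits : Nat)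
    (hpos : 0 < bits) (hlt : bits < 2 ^ ss.length) :
    pvCombo ss bits = (PySem.Set.ofList ss.flatten).filter (fun x => pvMaskB ss x == bits) := by
  have hzip : ((List.range ss.length).map (fun i => 2 ^ i)).zip ss
      = (List.range ss.length).map (fun i => ((2 : Nat) ^ i, ss.getD i [])) := by
    apply List.ext_getElem
    · simp
    · intro i hi1 hi2
      simp only [List.length_zip, List.length_map, List.length_range, min_self] at hi1
      rw [List.getElem_zip]
      simp only [List.getElem_map, List.getElem_range]
      rw [← List.getD_eq_getElem ss [] hi1]
  set q : Nat → Bool := fun i => bits &&& 2 ^ i != 0 with hqdef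
  have hq : ∀ i, q i = bits.testBit i := by
    intro i
    rw [hqdef]
    simp only [Nat.and_two_pow]
    cases h : bits.testBit i
    · simp
    · have h2 : (2:Nat) ^ i ≠ 0 := by positivity
      simp [h2]
  set incIdx := (List.range ss.length).filter q with hIdef
  have hmemI : ∀ i, i ∈ incIdx ↔ (i < ss.length ∧ bits.testBit i = true) := by
    intro i
    rw [hIdef, List.mem_filter, List.mem_range, hq]
  have hne : incIdx ≠ [] := by
    obtain ⟨i, hi⟩ := Nat.exists_testBit_of_ne_zero (by omega : bits ≠ 0)
    have hilt : i < ss.length := by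
      by_contra hc
      rw [Nat.testBit_lt_two_pow (lt_of_lt_of_le hlt (Nat.pow_le_pow_right (by norm_num) (by omega)))] at hi
      exact Bool.false_ne_true hi
    intro hnil
    rw [List.eq_nil_iff_forall_not_mem] at hnil
    exact hnil i ((hmemI i).mpr ⟨hilt, hi⟩)
  obtain ⟨j0, t, hI⟩ : ∃ j0 t, incIdx = j0 :: t := by
    cases h : incIdx with
    | nil => exact absurd h hne
    | cons a l => exact ⟨a, l, rfl⟩
  have hj0mem : j0 < ss.length ∧ bits.testBit j0 = true := (hmemI j0).mp (by rw [hI]; exact List.mem_cons_self)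
  have hpw : incIdx.Pairwise (· < ·) := List.Pairwise.filter q List.pairwise_lt_range
  have hmin : ∀ j, j < j0 → bits.testBit j = false := by
    intro j hj
    by_contra hc
    simp only [Bool.not_eq_false] at hc
    have hjI : j ∈ incIdx := (hmemI j).mpr ⟨by omega, hc⟩
    rw [hI] at hjI hpw
    rcases List.mem_cons.mp hjI with h | h
    · omega
    · have := (List.pairwise_cons.mp hpw).1 j h
      omega
  have htmem : ∀ i ∈ t, i < ss.length ∧ bits.testBit i = true := by
    intro i hi
    exact (hmemI i).mp (by rw [hI]; exact List.mem_cons_of_mem _ hi)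
  have hcombo : pvCombo ss bits = (ss.getD j0 []).filter
      (fun x => (t.map (fun i => ss.getD i [])).all (fun s => decide (x ∈ s)) &&
        (((List.range ss.length).filter (fun i => !(q i))).map (fun i => ss.getD i [])).all
          (fun s => decide (x ∉ s))) := by
    unfold pvCombo
    rw [hzip]
    simp only [List.filter_map, List.map_map]
    have e1 : ((fun (p : Nat × List Int) => bits &&& p.1 != 0) ∘ (fun i => ((2:Nat)^i, ss.getD i []))) = q := rfl
    have e2 : ((fun (p : Nat × List Int) => !(bits &&& p.1 != 0)) ∘ (fun i => ((2:Nat)^i, ss.getD i []))) = (fun i => !(q i)) := rfl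
    have e3 : ((fun (p : Nat × List Int) => p.2) ∘ (fun i => ((2:Nat)^i, ss.getD i []))) = (fun i => ss.getD i []) := rfl
    rw [e1, e2, e3, ← hIdef, hI, List.map_cons]
    simp only []
    rw [foldl_filter_eq_filter_all, foldl_filter_eq_filter_all, List.filter_filter]
    apply List.filter_congr
    intro x _
    rw [Bool.and_comm]
  rw [hcombo]
  have hex : ∀ i, i ∈ (List.range ss.length).filter (fun i => !(q i)) ↔
      (i < ss.length ∧ bits.testBit i = false) := by
    intro i
    rw [List.mem_filter, List.mem_range, hq]
    simp
  have hpred : ∀ x ∈ ss.getD j0 [],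
      ((t.map (fun i => ss.getD i [])).all (fun s => decide (x ∈ s)) &&
        (((List.range ss.length).filter (fun i => !(q i))).map (fun i => ss.getD i [])).all
          (fun s => decide (x ∉ s))) = (pvMaskB ss x == bits) := by
    intro x hx
    rw [Bool.eq_iff_iff]
    rw [List.all_map, List.all_map]
    simp only [Bool.and_eq_true, List.all_eq_true, Function.comp, decide_eq_true_eq, beq_iff_eq]
    rw [pvMask_eq_iff ss x bits hlt]
    constructor
    · rintro ⟨hint, hexc⟩ j hj
      cases hB : bits.testBit j
      · simp only [Bool.false_eq_true, false_iff]
        exact hexc j ((hex j).mpr ⟨hj, hB⟩)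
      · simp only [true_iff]
        have hjI : j ∈ incIdx := (hmemI j).mpr ⟨hj, hB⟩
        rw [hI] at hjI
        rcases List.mem_cons.mp hjI with h | h
        · rw [h]; exact hx
        · exact hint j h
    · intro hall
      constructor
      · intro i hi
        obtain ⟨hilt, hBi⟩ := htmem i hi
        exact ((hall i hilt).mp hBi)
      · intro i hi
        obtain ⟨hilt, hBi⟩ := (hex i).mp hi
        intro hc
        have h2 := (hall i hilt).mpr hc
        rw [hBi] at h2
        exact Bool.false_ne_true h2
  rw [List.filter_congr hpred]
  have hgetD : ss.getD j0 [] = ss[j0]'hj0mem.1 := List.getD_eq_getElem ss [] hj0mem.1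
  rw [hgetD]
  refine (filter_ofList_flatten_eq ss _ j0 hj0mem.1 (hnd _ (List.getElem_mem hj0mem.1)) ?_ ?_).symm
  · intro x hP
    rw [beq_iff_eq, pvMask_eq_iff ss x bits hlt] at hP
    rw [← hgetD]
    exact (hP j0 hj0mem.1).mp hj0mem.2
  · intro x j hj hjlt hP
    rw [beq_iff_eq, pvMask_eq_iff ss x bits hlt] at hP
    intro hc
    have := (hP j hj).mpr (by rw [List.getD_eq_getElem ss [] hj]; exact hc)
    rw [hmin j hjlt] at this
    exact Bool.false_ne_true this

lemma main_eq (sets : List (List Int)) : get_venn_sections sets = get_venn_sections_alt sets := by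
  unfold get_venn_sections get_venn_sections_alt
  dsimp only
  rw [PySem.List.foldl_append_singleton_eq_map]
  rw [List.nil_append]
  apply List.map_congr_left
  intro bits hbits
  have hmem : 1 ≤ bits ∧ bits < 2 ^ sets.length := by
    rw [List.mem_reverse, List.mem_map] at hbits
    obtain ⟨k, hk, rfl⟩ := hbits
    rw [List.mem_range] at hk
    have h2 : (1:Nat) ≤ 2 ^ sets.length := Nat.one_le_two_pow
    omega
  set ss := sets.map PySem.Set.ofList with hss
  have hlen : ss.length = sets.length := by rw [hss, List.length_map]
  rw [← hlen]
  show (String.join (List.map (fun flag => if bits &&& flag > 0 then "1" else "0")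
          (List.map (fun i => 2 ^ i) (List.range ss.length))), pvCombo ss bits)
      = (String.join (List.map (fun i => if bits >>> i &&& 1 = 1 then "1" else "0") (List.range ss.length)),
        (ss.foldl (fun st s => s.foldl (pvStep ss) st)
          ((PySem.Set.empty : PySem.Set Int), (PySem.Dict.empty : PySem.Dict Nat (List Int)))).2.getD bits [])
  have hnd : ∀ s ∈ ss, s.Nodup := by
    intro s hs
    rw [hss] at hs
    obtain ⟨l, _, rfl⟩ := List.mem_map.mp hs
    exact PySem.Set.nodup_ofList l
  rw [combo_eq_filter ss hnd bits (by omega) (by rw [hlen]; exact hmem.2), ← buckets_getD ss bits]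
  rw [tag_eq ss.length bits]

-- ===== VERDICT (by name: the statement is the Claim_ definition above) =====
theorem get_venn_sections_spec : Claim_equal_get_venn_sections := by
  intro sets _
  unfold Spec_get_venn_sections
  exact main_eq sets
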